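-- pv_equiv track=rewrite | github.com/jonathonreilly/toy-physics | scripts/frontier_koide_delta_cl3_boundary_source_grammar_no_go.py | c3_action_blade
-- ===== SOURCE A (Python) =====
-- def right_multiply_vector(mask: int, index: int) -> tuple[int, int]:
--     """Return sign, mask for e_mask * e_index in Euclidean Cl(3)."""
--     greater = sum(1 for j in range(index + 1, 3) if mask & (1 << j))
--     sign = -1 if greater % 2 else 1
--     return sign, mask ^ (1 << index)
--
-- def c3_action_blade(mask: int) -> tuple[int, int]:
--     """Cyclic automorphism e1->e2, e2->e3, e3->e1 on a Clifford blade."""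
--     sign = 1
--     out = 0
--     for index in range(3):
--         if mask & (1 << index):
--             image_index = (index + 1) % 3
--             s, out = right_multiply_vector(out, image_index)
--             sign *= s
--     return sign, out
-- ===== SOURCE B (Python) =====
-- def c3_action_blade(mask: int) -> tuple[int, int]:
--     """Cyclic automorphism e1->e2, e2->e3, e3->e1 on a Clifford blade (closed form)."""
--     m = mask & 7
--     out = ((m << 1) | (m >> 2)) & 7
--     sign = -1 if ((m >> 2) & 1) and ((m & 1) ^ ((m >> 1) & 1)) else 1
--     return sign, out
-- ===== Notes on version B (the rewrite author's own statement) =====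
-- stated objective: simpler
-- what changed: Replaces the per-bit loop with its chained right_multiply_vector calls (sign accumulation and XOR blade updates) by a closed form: a 3-bit rotation of mask & 7 and a single-bit-test sign formula.
import Mathlib
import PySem

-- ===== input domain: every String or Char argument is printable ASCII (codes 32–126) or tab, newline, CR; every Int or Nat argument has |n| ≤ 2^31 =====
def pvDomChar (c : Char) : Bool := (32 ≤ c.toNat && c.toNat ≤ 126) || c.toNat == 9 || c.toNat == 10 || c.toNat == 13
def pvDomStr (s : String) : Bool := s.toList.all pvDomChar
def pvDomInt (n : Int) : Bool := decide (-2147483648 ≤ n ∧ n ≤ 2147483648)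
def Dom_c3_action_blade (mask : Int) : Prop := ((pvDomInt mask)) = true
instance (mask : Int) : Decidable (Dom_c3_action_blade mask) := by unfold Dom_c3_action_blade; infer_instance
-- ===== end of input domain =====

-- B replaces A's per-bit loop of chained right_multiply_vector calls by a closed form
-- (3-bit rotation of mask & 7 plus a single-bit-test sign); objective: simpler.

-- ===== PORT A =====
-- sign, mask for e_mask * e_index; only ever called with index ∈ {0,1,2}, so the
-- '1 << j' with j from range(index+1, 3) is ported as '1 <<< j.toNat' (exact for j ≥ 0).
def right_multiply_vector (mask index : Int) : Int × Int :=
  let greater : Int :=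
    (PySem.List.pyRange (index + 1) 3 1).foldl
      (fun acc j => if PySem.Int.band mask ((1 : Int) <<< j.toNat) ≠ 0 then acc + 1 else acc) 0
  let sign : Int := if PySem.Int.mod greater 2 ≠ 0 then -1 else 1
  (sign, PySem.Int.bxor mask ((1 : Int) <<< index.toNat))

def c3_action_blade (mask : Int) : Int × Int :=
  let st :=
    (PySem.List.pyRange 0 3 1).foldl
      (fun (st : Int × Int) index =>
        if PySem.Int.band mask ((1 : Int) <<< index.toNat) ≠ 0 then
          let image_index := PySem.Int.mod (index + 1) 3
          let so := right_multiply_vector st.2 image_index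
          (st.1 * so.1, so.2)
        else st)
      ((1 : Int), (0 : Int))
  st

-- ===== PORT B =====
def c3_action_blade_alt (mask : Int) : Int × Int :=
  let m := PySem.Int.band mask 7
  let out := PySem.Int.band (PySem.Int.bor (m <<< 1) (m >>> 2)) 7
  let sign : Int :=
    if PySem.Int.band (m >>> 2) 1 ≠ 0 ∧
       PySem.Int.bxor (PySem.Int.band m 1) (PySem.Int.band (m >>> 1) 1) ≠ 0
    then -1 else 1
  (sign, out)

-- ===== PRECONDITION & SPEC =====
def Spec_c3_action_blade (mask : Int) (out : Int × Int) : Prop := out = c3_action_blade_alt mask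
instance (mask : Int) (out : Int × Int) : Decidable (Spec_c3_action_blade mask out) := by unfold Spec_c3_action_blade; infer_instance

-- ===== CLAIM (what is proved, stated in full; the proofs are below) =====
def Claim_equal_c3_action_blade : Prop := ∀ (mask : Int), Dom_c3_action_blade mask → Spec_c3_action_blade mask (c3_action_blade mask)

-- ===== LEMMAS AND PROOFS =====

-- For c < 8, 'a &&& c' only reads the low three bits of a.
lemma nat_and_mod (n c : Nat) (hc : c < 8) : n &&& c = (n % 8) &&& c := by
  apply Nat.eq_of_testBit_eq
  intro i
  rcases Nat.lt_or_ge i 3 with hi | hi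
  · have h8 : n % 8 = n % 2 ^ 3 := by norm_num
    rw [Nat.testBit_and, Nat.testBit_and, h8, Nat.testBit_mod_two_pow]
    simp [hi]
  · have hcf : c.testBit i = false :=
      Nat.testBit_eq_false_of_lt (lt_of_lt_of_le hc (by calc (8:Nat) = 2^3 := by norm_num
        _ ≤ 2 ^ i := Nat.pow_le_pow_right (by norm_num) hi))
    simp [Nat.testBit_and, hcf]

-- band only reads the low three bits when the second operand is < 8.
lemma band_emod8 (a : Int) (c : Nat) (hc : c < 8) :
    PySem.Int.band a (c : Int) = PySem.Int.band (a % 8) (c : Int) := by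
  by_cases ha : (0 : Int) ≤ a
  · have h8 : (0 : Int) ≤ a % 8 := Int.emod_nonneg a (by norm_num)
    have ht : (a % 8).toNat = a.toNat % 8 := by omega
    simp only [PySem.Int.band, ha, h8, if_true, Int.toNat_natCast, if_pos (Int.natCast_nonneg c)]
    rw [ht, ← nat_and_mod _ _ hc]
  · have h8 : (0 : Int) ≤ a % 8 := Int.emod_nonneg a (by norm_num)
    have hna : ¬ (0 : Int) ≤ a := ha
    simp only [PySem.Int.band, hna, h8, if_false, if_true, Int.toNat_natCast,
      if_pos (Int.natCast_nonneg c)]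
    -- a = -(m+1) with m = (-a-1).toNat
    have hm : (-a - 1).toNat = (-a - 1).toNat := rfl
    set m := (-a - 1).toNat with hmdef
    have hmm : a = -((m : Int) + 1) := by omega
    have ht : (a % 8).toNat = 7 - m % 8 := by omega
    rw [ht]
    rw [Nat.and_comm c m, nat_and_mod m c hc, Nat.and_comm (m % 8) c]
    have hm8 : m % 8 < 8 := Nat.mod_lt _ (by norm_num)
    set t := m % 8 with htdef
    have : c - (c &&& t) = (7 - t) &&& c := by
      interval_cases c <;> interval_cases t <;> decide
    rw [this]

theorem c3_action_blade_eq (mask : Int) : c3_action_blade mask = c3_action_blade_alt mask := by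
  have h1 : PySem.Int.band mask 1 = PySem.Int.band (mask % 8) 1 := by simpa using band_emod8 mask 1 (by norm_num)
  have h2 : PySem.Int.band mask 2 = PySem.Int.band (mask % 8) 2 := by simpa using band_emod8 mask 2 (by norm_num)
  have h4 : PySem.Int.band mask 4 = PySem.Int.band (mask % 8) 4 := by simpa using band_emod8 mask 4 (by norm_num)
  have h7 : PySem.Int.band mask 7 = PySem.Int.band (mask % 8) 7 := by simpa using band_emod8 mask 7 (by norm_num)
  have hrange : PySem.List.pyRange 0 3 1 = [0, 1, 2] := by decide
  have hlo : (0 : Int) ≤ mask % 8 := Int.emod_nonneg mask (by norm_num)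
  have hhi : mask % 8 < 8 := Int.emod_lt_of_pos mask (by norm_num)
  unfold c3_action_blade c3_action_blade_alt
  rw [hrange]
  simp only [List.foldl]
  have e0 : (1 : Int) <<< (((0 : Int).toNat : Int)) = 1 := by decide
  have e1 : (1 : Int) <<< (((1 : Int).toNat : Int)) = 2 := by decide
  have e2 : (1 : Int) <<< (((2 : Int).toNat : Int)) = 4 := by decide
  rw [e0, e1, e2, h1, h2, h4, h7]
  have : mask % 8 = 0 ∨ mask % 8 = 1 ∨ mask % 8 = 2 ∨ mask % 8 = 3 ∨ mask % 8 = 4 ∨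
      mask % 8 = 5 ∨ mask % 8 = 6 ∨ mask % 8 = 7 := by omega
  rcases this with h | h | h | h | h | h | h | h <;> rw [h] <;> decide

-- ===== VERDICT (by name: the statement is the Claim_ definition above) =====
theorem c3_action_blade_spec : Claim_equal_c3_action_blade := by
  intro mask _
  unfold Spec_c3_action_blade
  exact c3_action_blade_eq mask
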